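-- pv_equiv track=rewrite | github.com/bjornwictorin/aoc2023 | day5/seeds1.py | apply_table
-- ===== SOURCE A (Python) =====
-- from typing import List, Tuple
--
-- def apply_table(entries: List[int], table: List[Tuple[int, int, int]]) -> List[int]:
--     new_entries = []
--     for entry in entries:
--         new_entry = entry # by default values map to themselves
--         for dst_start, src_start, range_len in table:
--             if src_start <= entry < src_start + range_len:
--                 new_entry = dst_start + (entry - src_start)
--                 break
--         new_entries.append(new_entry)
--     assert len(entries) == len(new_entries)
--     return new_entries
-- ===== SOURCE B (Python) =====
-- from typing import List, Tuple
--
-- def apply_table(entries: List[int], table: List[Tuple[int, int, int]]) -> List[int]: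
--     # Table-outer traversal: start with identity results, and for each rule
--     # (in order) translate the entries it covers that no earlier rule claimed.
--     result = list(entries)
--     done = [False] * len(entries)
--     for dst_start, src_start, range_len in table:
--         hi = src_start + range_len
--         for i, entry in enumerate(entries):
--             if not done[i] and src_start <= entry < hi:
--                 result[i] = dst_start + (entry - src_start)
--                 done[i] = True
--     return result
-- ===== Notes on version B (the rewrite author's own statement) =====
-- stated objective: alternative
-- what changed: B inverts the loop nesting: instead of scanning the table afresh for each entry with a break, it initializes identity results and sweeps the table once, each rule translating the not-yet-claimed entries it covers, tracked by a done flag per entry.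
import Mathlib
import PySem

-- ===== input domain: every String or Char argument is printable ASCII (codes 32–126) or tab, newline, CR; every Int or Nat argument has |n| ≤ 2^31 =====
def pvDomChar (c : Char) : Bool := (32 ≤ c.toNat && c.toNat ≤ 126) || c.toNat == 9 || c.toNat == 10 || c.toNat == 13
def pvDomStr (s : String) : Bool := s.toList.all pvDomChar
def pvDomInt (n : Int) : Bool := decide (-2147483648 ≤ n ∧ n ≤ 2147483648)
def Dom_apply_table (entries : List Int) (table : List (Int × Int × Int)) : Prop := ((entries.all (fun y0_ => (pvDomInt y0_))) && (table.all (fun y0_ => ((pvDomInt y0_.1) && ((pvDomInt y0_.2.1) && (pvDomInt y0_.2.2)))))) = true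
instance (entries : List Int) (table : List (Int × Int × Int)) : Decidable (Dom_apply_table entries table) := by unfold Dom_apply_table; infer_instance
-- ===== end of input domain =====

-- B inverts the loop nesting (one sweep over the table translating not-yet-claimed
-- entries via per-entry done flags) instead of A's per-entry scan with break; objective: alternative.

-- ===== PORT A =====
-- A's inner loop: scan the table, return the first matching translation, else the entry itself.
def lookupA (entry : Int) : List (Int × Int × Int) → Int
  | [] => entry
  | (dst_start, src_start, range_len) :: rest =>
      if src_start ≤ entry ∧ entry < src_start + range_len then
        dst_start + (entry - src_start)
      else lookupA entry rest

def apply_table (entries : List Int) (table : List (Int × Int × Int)) : List Int :=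
  entries.map (fun entry => lookupA entry table)

-- ===== PORT B =====
-- B's state per entry: (entry, current result, done flag); one rule updates one state cell.
def stepRow (row : Int × Int × Int) (x : Int × Int × Bool) : Int × Int × Bool :=
  if x.2.2 = false ∧ row.2.1 ≤ x.1 ∧ x.1 < row.2.1 + row.2.2 then
    (x.1, row.1 + (x.1 - row.2.1), true)
  else x

def apply_table_alt (entries : List Int) (table : List (Int × Int × Int)) : List Int :=
  ((table.foldl (fun st row => st.map (stepRow row))
      (entries.map (fun e => (e, e, false)))).map (fun x => x.2.1))

-- ===== PRECONDITION & SPEC =====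
def Spec_apply_table (entries : List Int) (table : List (Int × Int × Int)) (out : List Int) : Prop := out = apply_table_alt entries table
instance (entries : List Int) (table : List (Int × Int × Int)) (out : List Int) : Decidable (Spec_apply_table entries table out) := by unfold Spec_apply_table; infer_instance

-- ===== CLAIM (what is proved, stated in full; the proofs are below) =====
def Claim_equal_apply_table : Prop := ∀ (entries : List Int) (table : List (Int × Int × Int)), Dom_apply_table entries table → Spec_apply_table entries table (apply_table entries table)

-- ===== LEMMAS AND PROOFS =====

-- the fold over the table acts pointwise on the state list
theorem fold_map_comm (table : List (Int × Int × Int)) (st : List (Int × Int × Bool)) :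
    table.foldl (fun st row => st.map (stepRow row)) st
      = st.map (fun x => table.foldl (fun y row => stepRow row y) x) := by
  induction table generalizing st with
  | nil => simp
  | cons r t ih => simp [List.foldl_cons, ih, List.map_map, Function.comp]

-- a done cell is never changed again
theorem fold_done (table : List (Int × Int × Int)) (e v : Int) :
    table.foldl (fun y row => stepRow row y) (e, v, true) = (e, v, true) := by
  induction table with
  | nil => rfl
  | cons r t ih =>
      rw [List.foldl_cons]
      have hs : stepRow r (e, v, true) = (e, v, true) := by simp [stepRow]
      rw [hs]; exact ih

-- per-entry, B's fold computes A's first-match lookup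
theorem fold_false (table : List (Int × Int × Int)) (e : Int) :
    (table.foldl (fun y row => stepRow row y) (e, e, false)).2.1 = lookupA e table := by
  induction table with
  | nil => rfl
  | cons r t ih =>
      obtain ⟨d, s, l⟩ := r
      rw [List.foldl_cons]
      by_cases h : s ≤ e ∧ e < s + l
      · have hs : stepRow (d, s, l) (e, e, false) = (e, d + (e - s), true) := by
          simp [stepRow, h]
        rw [hs, fold_done, lookupA, if_pos h]
      · have hs : stepRow (d, s, l) (e, e, false) = (e, e, false) := by
          simp [stepRow, h]
        rw [hs, lookupA, if_neg h]; exact ih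

-- ===== VERDICT (by name: the statement is the Claim_ definition above) =====
theorem apply_table_spec : Claim_equal_apply_table := by
  intro entries table _
  unfold Spec_apply_table apply_table apply_table_alt
  rw [fold_map_comm]
  simp only [List.map_map]
  refine List.map_congr_left (fun e _ => ?_)
  simp only [Function.comp]
  exact (fold_false table e).symm
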